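-- pv_equiv track=rewrite | github.com/leoouyang/csc411 | 36/proj3/fake_copy.py | words_counts
-- ===== SOURCE A (Python) =====
-- FAKE = "fake"
--
-- REAL = "real"
--
-- def words_counts(real, fake):
--     count = {}
--     for headline in real:
--         for word in set(headline.split()):
--             if word in count:
--                 count[word][REAL] += 1
--             else:
--                 count[word] = {REAL: 1, FAKE: 0}
--
--     for headline in fake:
--         for word in set(headline.split()):
--             if word in count:
--                 count[word][FAKE] += 1
--             else:
--                 count[word] = {REAL: 0, FAKE: 1}
--
--     return count
-- ===== SOURCE B (Python) =====
-- FAKE = "fake"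
--
-- REAL = "real"
--
-- def words_counts(real, fake):
--     # List the distinct words in first-appearance order, then for each word count
--     # how many real / fake headlines contain it (membership per headline replaces
--     # A's incremental dict updates; A's set() only makes each headline count once).
--     real_sets = [set(h.split()) for h in real]
--     fake_sets = [set(h.split()) for h in fake]
--     order = dict.fromkeys(w for h in real + fake for w in h.split())
--     return {w: {REAL: sum(w in s for s in real_sets),
--                 FAKE: sum(w in s for s in fake_sets)}
--             for w in order}
-- ===== Notes on version B (the rewrite author's own statement) =====
-- stated objective: alternative
-- what changed: A builds the result incrementally, updating one dict of per-word {real,fake} tallies while streaming over both headline lists; B never updates a count: it first lists the distinct words in order of first appearance and then computes each word's two counts directly as the number of real/fake headlines containing it.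
import Mathlib
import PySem

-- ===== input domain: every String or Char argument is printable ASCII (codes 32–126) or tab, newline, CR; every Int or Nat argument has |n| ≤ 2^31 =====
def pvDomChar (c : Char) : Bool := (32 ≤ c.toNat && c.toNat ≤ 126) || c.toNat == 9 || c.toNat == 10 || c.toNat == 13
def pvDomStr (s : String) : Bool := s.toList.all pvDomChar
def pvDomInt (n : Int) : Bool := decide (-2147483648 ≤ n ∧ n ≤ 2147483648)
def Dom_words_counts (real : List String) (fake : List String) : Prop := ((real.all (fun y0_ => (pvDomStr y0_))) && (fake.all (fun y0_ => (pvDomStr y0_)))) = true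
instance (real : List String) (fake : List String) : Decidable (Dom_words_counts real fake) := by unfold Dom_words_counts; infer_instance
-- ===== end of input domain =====

-- B replaces A's incremental single-dict tallying with a direct computation: it first
-- lists the distinct words in first-appearance order, then computes each word's two
-- counts as the number of real / fake headlines containing it (objective: alternative
-- algorithm, no running counts; not claimed faster). Python set iteration order is not
-- modelled: A's port iterates each headline's word set in first-occurrence order, and
-- the resulting dicts are equal as dicts.

-- ===== PORT A =====
def words_counts (real : List String) (fake : List String) : List (String × List (String × Int)) :=
  let c1 : PySem.Dict String (PySem.Dict String Int) :=
    real.foldl (fun count headline =>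
      (PySem.Set.ofList (PySem.Str.split₀ headline)).foldl (fun count word =>
        if count.contains word then
          count.modify word PySem.Dict.empty (fun inner => inner.modify "real" 0 (· + 1))
        else
          count.insert word (PySem.Dict.ofList [("real", (1 : Int)), ("fake", 0)])) count)
      PySem.Dict.empty
  let c2 : PySem.Dict String (PySem.Dict String Int) :=
    fake.foldl (fun count headline =>
      (PySem.Set.ofList (PySem.Str.split₀ headline)).foldl (fun count word =>
        if count.contains word then
          count.modify word PySem.Dict.empty (fun inner => inner.modify "fake" 0 (· + 1))
        else
          count.insert word (PySem.Dict.ofList [("real", (0 : Int)), ("fake", 1)])) count)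
      c1
  c2.items.map (fun p => (p.1, p.2.items))

-- ===== PORT B =====
-- dict.fromkeys over the word stream = PySem.Set.ofList (first occurrences, in order);
-- its keys are distinct, so the dict comprehension is literally this association list,
-- and each inner dict {REAL: …, FAKE: …} is its two-pair list; sum of booleans = countP.
def words_counts_alt (real : List String) (fake : List String) : List (String × List (String × Int)) :=
  let real_sets : List (PySem.Set String) := real.map (fun h => PySem.Set.ofList (PySem.Str.split₀ h))
  let fake_sets : List (PySem.Set String) := fake.map (fun h => PySem.Set.ofList (PySem.Str.split₀ h))
  let order : PySem.Set String := PySem.Set.ofList ((real ++ fake).flatMap (fun h => PySem.Str.split₀ h))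
  order.map (fun w =>
    (w, [("real", ((real_sets.countP (fun s => PySem.Set.contains s w)) : Int)),
         ("fake", ((fake_sets.countP (fun s => PySem.Set.contains s w)) : Int))]))

-- ===== PRECONDITION & SPEC =====
def Spec_words_counts (real : List String) (fake : List String) (out : List (String × List (String × Int))) : Prop := out = words_counts_alt real fake
instance (real : List String) (fake : List String) (out : List (String × List (String × Int))) : Decidable (Spec_words_counts real fake out) := by unfold Spec_words_counts; infer_instance

-- ===== CLAIM (what is proved, stated in full; the proofs are below) =====
def Claim_equal_words_counts : Prop := ∀ (real : List String) (fake : List String), Dom_words_counts real fake → Spec_words_counts real fake (words_counts real fake)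

-- ===== LEMMAS AND PROOFS =====

def pvMkD (r f : Int) : PySem.Dict String Int := PySem.Dict.ofList [("real", r), ("fake", f)]
def pvStepR (c : PySem.Dict String (PySem.Dict String Int)) (w : String) :
    PySem.Dict String (PySem.Dict String Int) :=
  if c.contains w then c.modify w PySem.Dict.empty (fun inner => inner.modify "real" 0 (· + 1))
  else c.insert w (PySem.Dict.ofList [("real", (1 : Int)), ("fake", 0)])
lemma pvMkD_modR (r f : Int) : (pvMkD r f).modify "real" 0 (· + 1) = pvMkD (r + 1) f := rfl
lemma pvKeys_mk_map (K : List String) (f : String → PySem.Dict String Int) :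
    (PySem.Dict.mk (K.map (fun w => (w, f w)))).keys = K := by
  simp [PySem.Dict.keys, List.map_map, Function.comp_def]

lemma pvContains_mk_map (K : List String) (f : String → PySem.Dict String Int) (w : String) :
    (PySem.Dict.mk (K.map (fun w => (w, f w)))).contains w = true ↔ w ∈ K := by
  rw [PySem.Dict.contains_iff_mem_keys, pvKeys_mk_map]

lemma pvPhase1 (ws : List String) :
    ws.foldl pvStepR PySem.Dict.empty =
      PySem.Dict.mk ((PySem.Set.ofList ws).map (fun w => (w, pvMkD (ws.count w) 0))) := by
  induction ws using List.reverseRecOn with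
  | nil => rfl
  | append_singleton ws w ih =>
    rw [List.foldl_append, List.foldl_cons, List.foldl_nil, ih]
    unfold pvStepR
    by_cases hw : w ∈ ws
    · have hwo : w ∈ PySem.Set.ofList ws := (PySem.Set.mem_ofList ws w).2 hw
      rw [if_pos ((pvContains_mk_map _ _ _).2 hwo)]
      rw [PySem.Dict.modify]
      have hk : (PySem.Dict.mk ((PySem.Set.ofList ws).map (fun w => (w, pvMkD (ws.count w) 0)))).keys.Nodup := by
        rw [pvKeys_mk_map]; exact PySem.Set.nodup_ofList ws
      have hmem : (w, pvMkD (ws.count w) 0) ∈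
          ((PySem.Set.ofList ws).map (fun w => (w, pvMkD (ws.count w) 0))) :=
        List.mem_map_of_mem hwo
      rw [PySem.Dict.getD_of_mem_items _ hmem hk, pvMkD_modR]
      apply PySem.Dict.ext
      rw [PySem.Dict.items_insert_of_contains _ _ ((pvContains_mk_map _ _ _).2 hwo)]
      show List.map _ ((PySem.Set.ofList ws).map _) = ((PySem.Set.ofList (ws ++ [w])).map _)
      rw [PySem.Set.ofList_append_singleton, PySem.Set.add_of_mem hwo, List.map_map]
      apply List.map_congr_left
      intro x _
      by_cases hx : x = w
      · simp [hx, List.count_append]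
      · simp [Function.comp, hx, List.count_append,
          List.count_eq_zero_of_not_mem (by simp [hx] : x ∉ [w])]
    · have hwo : w ∉ PySem.Set.ofList ws := fun h => hw ((PySem.Set.mem_ofList ws w).1 h)
      have hc : (PySem.Dict.mk ((PySem.Set.ofList ws).map (fun w => (w, pvMkD (ws.count w) 0)))).contains w = false := by
        cases h : (PySem.Dict.mk ((PySem.Set.ofList ws).map (fun w => (w, pvMkD (ws.count w) 0)))).contains w
        · rfl
        · exact absurd ((pvContains_mk_map _ _ _).1 h) hwo
      rw [if_neg (by simp [hc])]
      apply PySem.Dict.ext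
      rw [PySem.Dict.items_insert_of_not_contains _ _ hc]
      show (PySem.Set.ofList ws).map _ ++ _ = ((PySem.Set.ofList (ws ++ [w])).map _)
      rw [PySem.Set.ofList_append_singleton, PySem.Set.add_of_not_mem hwo, List.map_append]
      congr 1
      · apply List.map_congr_left
        intro x hx
        have hxw : x ≠ w := fun h => hwo (h ▸ hx)
        simp [List.count_append, List.count_eq_zero_of_not_mem (by simp [hxw] : x ∉ [w])]
      · simp [pvMkD, List.count_append, List.count_eq_zero_of_not_mem hw]

def pvStepF (c : PySem.Dict String (PySem.Dict String Int)) (w : String) :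
    PySem.Dict String (PySem.Dict String Int) :=
  if c.contains w then c.modify w PySem.Dict.empty (fun inner => inner.modify "fake" 0 (· + 1))
  else c.insert w (PySem.Dict.ofList [("real", (0 : Int)), ("fake", 1)])
def pvPartR (ws vs : List String) : List (String × PySem.Dict String Int) :=
  (PySem.Set.ofList ws).map (fun w => (w, pvMkD (ws.count w) (vs.count w)))
def pvPartF (ws vs : List String) : List (String × PySem.Dict String Int) :=
  ((PySem.Set.ofList vs).diff (PySem.Set.ofList ws)).map (fun w => (w, pvMkD 0 (vs.count w)))
lemma pvMkD_modF (r f : Int) : (pvMkD r f).modify "fake" 0 (· + 1) = pvMkD r (f + 1) := rfl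

lemma pvKeys_mk_app (K L : List String) (f g : String → PySem.Dict String Int) :
    (PySem.Dict.mk (K.map (fun w => (w, f w)) ++ L.map (fun w => (w, g w)))).keys = K ++ L := by
  simp [PySem.Dict.keys, List.map_map, Function.comp_def]

lemma pvContains_mk_app (K L : List String) (f g : String → PySem.Dict String Int) (w : String) :
    (PySem.Dict.mk (K.map (fun w => (w, f w)) ++ L.map (fun w => (w, g w)))).contains w = true ↔ w ∈ K ∨ w ∈ L := by
  rw [PySem.Dict.contains_iff_mem_keys, pvKeys_mk_app]; simp

lemma pvDiff_add_of_mem_right {s t : PySem.Set String} {v : String} (hv : v ∈ t) :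
    (s.add v).diff t = s.diff t := by
  rw [PySem.Set.add_eq_ite]
  split
  · rfl
  · show (s ++ [v]).filter _ = s.filter _
    rw [List.filter_append]
    simp [hv]

lemma pvDiff_add_fresh {s t : PySem.Set String} {v : String} (hs : v ∉ s) (ht : v ∉ t) :
    (s.add v).diff t = s.diff t ++ [v] := by
  rw [PySem.Set.add_of_not_mem hs]
  show (s ++ [v]).filter _ = s.filter _ ++ [v]
  rw [List.filter_append]
  simp [ht]

lemma pvPhase2 (ws vs : List String) :
    vs.foldl pvStepF (PySem.Dict.mk ((PySem.Set.ofList ws).map (fun w => (w, pvMkD (ws.count w) 0)))) =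
      PySem.Dict.mk (pvPartR ws vs ++ pvPartF ws vs) := by
  induction vs using List.reverseRecOn with
  | nil => simp [pvPartR, pvPartF, PySem.Set.diff]
  | append_singleton vs v ih =>
    rw [List.foldl_append, List.foldl_cons, List.foldl_nil, ih]
    unfold pvStepF pvPartR pvPartF
    have hnd : (PySem.Dict.mk
        ((PySem.Set.ofList ws).map (fun w => (w, pvMkD (ws.count w) (vs.count w))) ++
         ((PySem.Set.ofList vs).diff (PySem.Set.ofList ws)).map (fun w => (w, pvMkD 0 (vs.count w))))).keys.Nodup := by
      rw [pvKeys_mk_app]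
      refine List.Nodup.append (PySem.Set.nodup_ofList ws)
        (PySem.Set.nodup_diff _ _ (PySem.Set.nodup_ofList vs)) ?_
      rw [List.disjoint_right]
      intro a ha
      exact ((PySem.Set.mem_diff _ _ a).1 ha).2
    by_cases hw : v ∈ ws
    · -- v is a real-side key: its entry in the first part is modified
      have hvo : v ∈ PySem.Set.ofList ws := (PySem.Set.mem_ofList ws v).2 hw
      have hc := (pvContains_mk_app (PySem.Set.ofList ws) ((PySem.Set.ofList vs).diff (PySem.Set.ofList ws))
        (fun w => pvMkD (ws.count w) (vs.count w)) (fun w => pvMkD 0 (vs.count w)) v).2 (Or.inl hvo)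
      rw [if_pos hc, PySem.Dict.modify]
      have hmem : (v, pvMkD (ws.count v) (vs.count v)) ∈
          ((PySem.Set.ofList ws).map (fun w => (w, pvMkD (ws.count w) (vs.count w))) ++
           ((PySem.Set.ofList vs).diff (PySem.Set.ofList ws)).map (fun w => (w, pvMkD 0 (vs.count w)))) :=
        List.mem_append_left _ (List.mem_map_of_mem hvo)
      rw [PySem.Dict.getD_of_mem_items _ hmem hnd, pvMkD_modF]
      apply PySem.Dict.ext
      rw [PySem.Dict.items_insert_of_contains _ _ hc]
      show List.map _ (_ ++ _) = _
      rw [List.map_append, PySem.Set.ofList_append_singleton, pvDiff_add_of_mem_right hvo]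
      congr 1
      · rw [List.map_map]
        apply List.map_congr_left
        intro x _
        by_cases hx : x = v
        · simp [hx, List.count_append]
        · simp [hx, List.count_append,
            List.count_eq_zero_of_not_mem (by simp [hx] : x ∉ [v])]
      · rw [List.map_map]
        apply List.map_congr_left
        intro x hxd
        have hx : x ≠ v := fun h => ((PySem.Set.mem_diff _ _ x).1 hxd).2 (h ▸ hvo)
        simp [hx, List.count_append,
          List.count_eq_zero_of_not_mem (by simp [hx] : x ∉ [v])]
    · have hvo : v ∉ PySem.Set.ofList ws := fun h => hw ((PySem.Set.mem_ofList ws v).1 h)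
      by_cases hv2 : v ∈ vs
      · -- v is a fake-only key already seen: its entry in the second part is modified
        have hvd : v ∈ (PySem.Set.ofList vs).diff (PySem.Set.ofList ws) :=
          (PySem.Set.mem_diff _ _ v).2 ⟨(PySem.Set.mem_ofList vs v).2 hv2, hvo⟩
        have hc := (pvContains_mk_app (PySem.Set.ofList ws) ((PySem.Set.ofList vs).diff (PySem.Set.ofList ws))
          (fun w => pvMkD (ws.count w) (vs.count w)) (fun w => pvMkD 0 (vs.count w)) v).2 (Or.inr hvd)
        rw [if_pos hc, PySem.Dict.modify]
        have hmem : (v, pvMkD 0 (vs.count v)) ∈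
            ((PySem.Set.ofList ws).map (fun w => (w, pvMkD (ws.count w) (vs.count w))) ++
             ((PySem.Set.ofList vs).diff (PySem.Set.ofList ws)).map (fun w => (w, pvMkD 0 (vs.count w)))) :=
          List.mem_append_right _ (List.mem_map_of_mem hvd)
        rw [PySem.Dict.getD_of_mem_items _ hmem hnd, pvMkD_modF]
        apply PySem.Dict.ext
        rw [PySem.Dict.items_insert_of_contains _ _ hc]
        show List.map _ (_ ++ _) = _
        rw [List.map_append, PySem.Set.ofList_append_singleton,
          PySem.Set.add_of_mem ((PySem.Set.mem_ofList vs v).2 hv2)]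
        congr 1
        · rw [List.map_map]
          apply List.map_congr_left
          intro x hxo
          have hx : x ≠ v := fun h => hvo (h ▸ hxo)
          simp [hx, List.count_append,
            List.count_eq_zero_of_not_mem (by simp [hx] : x ∉ [v])]
        · rw [List.map_map]
          apply List.map_congr_left
          intro x _
          by_cases hx : x = v
          · simp [hx, List.count_append]
          · simp [hx, List.count_append,
              List.count_eq_zero_of_not_mem (by simp [hx] : x ∉ [v])]
      · -- brand-new fake-only key: appended at the end
        have hvd : v ∉ (PySem.Set.ofList vs).diff (PySem.Set.ofList ws) := fun h =>
          hv2 ((PySem.Set.mem_ofList vs v).1 ((PySem.Set.mem_diff _ _ v).1 h).1)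
        have hc : (PySem.Dict.mk
            ((PySem.Set.ofList ws).map (fun w => (w, pvMkD (ws.count w) (vs.count w))) ++
             ((PySem.Set.ofList vs).diff (PySem.Set.ofList ws)).map (fun w => (w, pvMkD 0 (vs.count w))))).contains v = false := by
          cases h : (PySem.Dict.mk
            ((PySem.Set.ofList ws).map (fun w => (w, pvMkD (ws.count w) (vs.count w))) ++
             ((PySem.Set.ofList vs).diff (PySem.Set.ofList ws)).map (fun w => (w, pvMkD 0 (vs.count w))))).contains v
          · rfl
          · rcases (pvContains_mk_app _ _ _ _ _).1 h with h' | h'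
            · exact absurd h' hvo
            · exact absurd h' hvd
        rw [if_neg (by simp [hc])]
        apply PySem.Dict.ext
        rw [PySem.Dict.items_insert_of_not_contains _ _ hc]
        show (_ ++ _) ++ _ = _
        rw [PySem.Set.ofList_append_singleton,
          pvDiff_add_fresh (fun h => hv2 ((PySem.Set.mem_ofList vs v).1 h)) hvo,
          List.map_append, List.append_assoc]
        congr 1
        · apply List.map_congr_left
          intro x hxo
          have hx : x ≠ v := fun h => hvo (h ▸ hxo)
          simp [List.count_append,
            List.count_eq_zero_of_not_mem (by simp [hx] : x ∉ [v])]
        congr 1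
        · apply List.map_congr_left
          intro x hxd
          have hx : x ≠ v := fun h => hvd (h ▸ hxd)
          simp [List.count_append,
            List.count_eq_zero_of_not_mem (by simp [hx] : x ∉ [v])]
        · simp [pvMkD, List.count_append, List.count_eq_zero_of_not_mem hv2]

def pvWords (hs : List String) : List String :=
  hs.flatMap (fun h => PySem.Set.ofList (PySem.Str.split₀ h))

lemma pvA_items (real fake : List String) :
    words_counts real fake = (pvPartR (pvWords real) (pvWords fake) ++ pvPartF (pvWords real) (pvWords fake)).map (fun p => (p.1, p.2.items)) := by
  show ((fake.foldl (fun c h => (PySem.Set.ofList (PySem.Str.split₀ h)).foldl pvStepF c)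
      (real.foldl (fun c h => (PySem.Set.ofList (PySem.Str.split₀ h)).foldl pvStepR c)
        PySem.Dict.empty)).items).map (fun p => (p.1, p.2.items)) = _
  rw [← List.foldl_flatMap, ← List.foldl_flatMap, ← pvWords, ← pvWords, pvPhase1, pvPhase2]

-- B-side lemmas: characterise the first-appearance key order and the per-word counts.
lemma pvItems_mkD (r f : Int) : (pvMkD r f).items = [("real", r), ("fake", f)] := rfl

lemma pvUpdate_ofList (s : PySem.Set String) (xs : List String) :
    PySem.Set.update s xs = PySem.Set.update s (PySem.Set.ofList xs) := by
  rw [PySem.Set.update_eq_append_filter, PySem.Set.update_eq_append_filter, PySem.Set.ofList_ofList]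

lemma pvUpdate_dedup (l : List String) :
    ∀ s : PySem.Set String,
      PySem.Set.update s (l.flatMap (fun h => PySem.Str.split₀ h)) =
      PySem.Set.update s (l.flatMap (fun h => PySem.Set.ofList (PySem.Str.split₀ h))) := by
  induction l with
  | nil => intro s; rfl
  | cons h t ih =>
    intro s
    rw [List.flatMap_cons, List.flatMap_cons, PySem.Set.update_append, PySem.Set.update_append,
      ← pvUpdate_ofList, ih]

lemma pvOfList_raw (l : List String) :
    PySem.Set.ofList (l.flatMap (fun h => PySem.Str.split₀ h)) = PySem.Set.ofList (pvWords l) := by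
  rw [← PySem.Set.update_nil_left, ← PySem.Set.update_nil_left, pvUpdate_dedup, pvWords]

lemma pvOfList_order (ws vs : List String) :
    PySem.Set.ofList (ws ++ vs) =
      PySem.Set.ofList ws ++ (PySem.Set.ofList vs).diff (PySem.Set.ofList ws) := by
  rw [PySem.Set.ofList_append, PySem.Set.update_eq_append_filter]
  rfl

lemma pvCount_stream (l : List String) (w : String) :
    (pvWords l).count w = (l.map (fun h => PySem.Set.ofList (PySem.Str.split₀ h))).countP
      (fun s => PySem.Set.contains s w) := by
  induction l with
  | nil => rfl
  | cons h t ih =>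
    rw [pvWords, List.flatMap_cons, List.count_append, List.map_cons, List.countP_cons, ← pvWords, ih]
    by_cases hm : w ∈ PySem.Set.ofList (PySem.Str.split₀ h)
    · rw [List.count_eq_one_of_mem (PySem.Set.nodup_ofList _) hm,
        show PySem.Set.contains (PySem.Set.ofList (PySem.Str.split₀ h)) w = true from
          (PySem.Set.contains_iff _ _).2 hm]
      simp [Nat.add_comm]
    · rw [List.count_eq_zero_of_not_mem hm,
        show PySem.Set.contains (PySem.Set.ofList (PySem.Str.split₀ h)) w = false from by
          cases hc : PySem.Set.contains (PySem.Set.ofList (PySem.Str.split₀ h)) w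
          · rfl
          · exact absurd ((PySem.Set.contains_iff _ _).1 hc) hm]
      simp

lemma pvB_items (real fake : List String) :
    words_counts_alt real fake =
      (pvPartR (pvWords real) (pvWords fake) ++ pvPartF (pvWords real) (pvWords fake)).map (fun p => (p.1, p.2.items)) := by
  simp only [words_counts_alt]
  have horder : PySem.Set.ofList ((real ++ fake).flatMap (fun h => PySem.Str.split₀ h)) =
      PySem.Set.ofList (pvWords real) ++
        (PySem.Set.ofList (pvWords fake)).diff (PySem.Set.ofList (pvWords real)) := by
    rw [List.flatMap_append, PySem.Set.ofList_append, pvUpdate_ofList, pvOfList_raw real,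
      pvOfList_raw fake, ← pvUpdate_ofList, ← PySem.Set.ofList_append, pvOfList_order]
  rw [horder, List.map_append, pvPartR, pvPartF, List.map_append, List.map_map, List.map_map]
  congr 1
  · apply List.map_congr_left
    intro w _
    simp only [Function.comp_def, pvItems_mkD]
    rw [pvCount_stream real w, pvCount_stream fake w]
  · apply List.map_congr_left
    intro w hw
    have hwn : w ∉ pvWords real := fun h =>
      ((PySem.Set.mem_diff _ _ w).1 hw).2 ((PySem.Set.mem_ofList _ w).2 h)
    have h0 : (real.map (fun h => PySem.Set.ofList (PySem.Str.split₀ h))).countP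
        (fun s => PySem.Set.contains s w) = 0 := by
      rw [← pvCount_stream]; exact List.count_eq_zero_of_not_mem hwn
    simp only [Function.comp_def, pvItems_mkD, h0, Nat.cast_zero]
    rw [pvCount_stream fake w]

-- ===== VERDICT (by name: the statement is the Claim_ definition above) =====
theorem words_counts_spec : Claim_equal_words_counts := by
  intro real fake _
  unfold Spec_words_counts
  rw [pvA_items, pvB_items]
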